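-- pv_equiv track=rewrite | github.com/Mapanare-Research/Mapanare | mapanare/emit_llvm_text.py | _split_fields
-- ===== SOURCE A (Python) =====
-- def _split_fields(s: str) -> list[str]:
--     """Split comma-separated types respecting nested braces."""
--     fields: list[str] = []
--     depth = 0
--     cur = ""
--     for ch in s:
--         if ch == "{":
--             depth += 1
--         elif ch == "}":
--             depth -= 1
--         if ch == "," and depth == 0:
--             fields.append(cur.strip())
--             cur = ""
--         else:
--             cur += ch
--     if cur.strip():
--         fields.append(cur.strip())
--     return fields
-- ===== SOURCE B (Python) =====
-- def _find_top_comma(u):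
--     depth = 0
--     for i, ch in enumerate(u):
--         if ch == '{':
--             depth += 1
--         elif ch == '}':
--             depth -= 1
--         elif ch == ',' and depth == 0:
--             return i
--     return None
--
--
-- def _split_top(u):
--     i = _find_top_comma(u)
--     if i is None:
--         return [u]
--     return [u[:i]] + _split_top(u[i + 1:])
--
--
-- def _split_fields(s: str) -> list[str]:
--     fields = [p.strip() for p in _split_top(s)]
--     if not fields[-1]:
--         fields.pop()
--     return fields
-- ===== Notes on version B (the rewrite author's own statement) =====
-- stated objective: alternative
-- what changed: Replaces A's single accumulator loop (growing a current-field buffer character by character) with a recursive divide-at-first-top-level-comma decomposition: find the first depth-0 comma, slice, recurse on the remainder, then strip all pieces and drop only a trailing empty field.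
import Mathlib
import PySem

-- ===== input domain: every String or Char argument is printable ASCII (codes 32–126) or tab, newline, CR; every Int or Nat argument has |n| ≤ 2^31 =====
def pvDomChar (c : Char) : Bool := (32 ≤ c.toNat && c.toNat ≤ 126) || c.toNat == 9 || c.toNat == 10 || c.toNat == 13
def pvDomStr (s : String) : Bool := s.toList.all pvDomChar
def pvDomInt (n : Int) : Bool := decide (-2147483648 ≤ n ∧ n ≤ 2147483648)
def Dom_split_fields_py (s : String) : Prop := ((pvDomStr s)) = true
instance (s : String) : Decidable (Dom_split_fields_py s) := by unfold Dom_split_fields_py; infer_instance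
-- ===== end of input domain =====

-- B replaces A's character-accumulator loop by a recursive split at the first top-level comma
-- followed by stripping every piece and dropping only a trailing empty field (alternative decomposition).

-- ===== PORT A =====
-- the loop body of A: state = (fields, depth, cur)
def splitFieldsStep (st : List String × Int × String) (ch : Char) : List String × Int × String :=
  let fields := st.1
  let depth := st.2.1
  let cur := st.2.2
  let depth := if ch = '{' then depth + 1 else if ch = '}' then depth - 1 else depth
  if ch = ',' ∧ depth = 0 then (fields ++ [PySem.Str.strip cur], depth, "")
  else (fields, depth, cur.push ch)

def split_fields_py (s : String) : List String :=
  let st := s.toList.foldl splitFieldsStep ([], 0, "")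
  if PySem.Str.strip st.2.2 ≠ "" then st.1 ++ [PySem.Str.strip st.2.2] else st.1

-- ===== PORT B =====
-- _find_top_comma: index of the first comma at brace depth 0, scanning left to right
def findTopComma : List Char → Int → Option Nat
  | [], _ => none
  | ch :: t, depth =>
    if ch = '{' then (findTopComma t (depth + 1)).map (· + 1)
    else if ch = '}' then (findTopComma t (depth - 1)).map (· + 1)
    else if ch = ',' ∧ depth = 0 then some 0
    else (findTopComma t depth).map (· + 1)

theorem findTopComma_lt_length : ∀ (l : List Char) (d : Int) (i : Nat),
    findTopComma l d = some i → i < l.length := by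
  intro l
  induction l with
  | nil => intro d i h; simp [findTopComma] at h
  | cons ch t ih =>
    intro d i h
    simp only [findTopComma] at h
    split_ifs at h with h1 h2 h3
    · rcases Option.map_eq_some_iff.mp h with ⟨j, hj, rfl⟩
      exact Nat.succ_lt_succ (ih _ _ hj)
    · rcases Option.map_eq_some_iff.mp h with ⟨j, hj, rfl⟩
      exact Nat.succ_lt_succ (ih _ _ hj)
    · cases h; simp
    · rcases Option.map_eq_some_iff.mp h with ⟨j, hj, rfl⟩
      exact Nat.succ_lt_succ (ih _ _ hj)

-- _split_top: split at the first top-level comma and recurse on the remainder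
def splitTop (l : List Char) : List (List Char) :=
  match h : findTopComma l 0 with
  | none => [l]
  | some i => l.take i :: splitTop (l.drop (i + 1))
termination_by l.length
decreasing_by
  have := findTopComma_lt_length l 0 i h
  simp only [List.length_drop]
  omega

def split_fields_py_alt (s : String) : List String :=
  let fields := (splitTop s.toList).map (fun p => String.ofList (PySem.Chars.strip p))
  if fields.getLast! = "" then fields.dropLast else fields

-- ===== PRECONDITION & SPEC =====
def Spec_split_fields_py (s : String) (out : List String) : Prop := out = split_fields_py_alt s
instance (s : String) (out : List String) : Decidable (Spec_split_fields_py s out) := by unfold Spec_split_fields_py; infer_instance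

-- ===== CLAIM (what is proved, stated in full; the proofs are below) =====
def Claim_equal_split_fields_py : Prop := ∀ (s : String), Dom_split_fields_py s → Spec_split_fields_py s (split_fields_py s)

-- ===== LEMMAS AND PROOFS =====

-- the raw (unstripped) top-level segments of l, scanning from depth d
def rawSegs : List Char → Int → List (List Char)
  | [], _ => [[]]
  | ch :: t, depth =>
    let depth' := if ch = '{' then depth + 1 else if ch = '}' then depth - 1 else depth
    if ch = ',' ∧ depth' = 0 then [] :: rawSegs t depth'
    else
      match rawSegs t depth' with
      | [] => [[ch]]
      | h :: r => (ch :: h) :: r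

theorem rawSegs_ne_nil (l : List Char) (d : Int) : rawSegs l d ≠ [] := by
  cases l with
  | nil => simp [rawSegs]
  | cons ch t =>
    simp only [rawSegs]
    split_ifs <;> try simp
    all_goals (split <;> simp)

-- finish: strip every segment, keep the last only if nonempty after stripping
def finishSegs : List (List Char) → List String
  | [] => []
  | [c] => if PySem.Chars.strip c ≠ [] then [String.ofList (PySem.Chars.strip c)] else []
  | c :: c' :: segs => String.ofList (PySem.Chars.strip c) :: finishSegs (c' :: segs)

theorem finishSegs_cons (c : List Char) (segs : List (List Char)) (h : segs ≠ []) :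
    finishSegs (c :: segs) = String.ofList (PySem.Chars.strip c) :: finishSegs segs := by
  cases segs with
  | nil => exact absurd rfl h
  | cons x r => rfl

-- prepend c to the first segment
def consAttach (c : List Char) : List (List Char) → List (List Char)
  | [] => [c]
  | h :: r => (c ++ h) :: r

theorem strip_ne_empty_iff (c : String) :
    (PySem.Str.strip c ≠ "") ↔ PySem.Chars.strip c.toList ≠ [] := by
  have h : (PySem.Str.strip c).toList = PySem.Chars.strip c.toList := PySem.Str.toList_strip c
  constructor
  · intro hne hc
    apply hne
    have : (PySem.Str.strip c).toList = ("" : String).toList := by rw [h, hc]; rfl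
    exact String.toList_inj.mp this
  · intro hne hc
    apply hne
    rw [← h, hc]
    rfl

theorem str_strip_eq (c : String) : PySem.Str.strip c = String.ofList (PySem.Chars.strip c.toList) := by
  have h : (PySem.Str.strip c).toList = PySem.Chars.strip c.toList := PySem.Str.toList_strip c
  apply String.toList_inj.mp
  rw [h]
  exact String.toList_ofList.symm

-- A's loop invariant
theorem loopA_invariant : ∀ (l : List Char) (d : Int) (cur : String) (F : List String),
    (let st := l.foldl splitFieldsStep (F, d, cur)
     if PySem.Str.strip st.2.2 ≠ "" then st.1 ++ [PySem.Str.strip st.2.2] else st.1)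
      = F ++ finishSegs (consAttach cur.toList (rawSegs l d)) := by
  intro l
  induction l with
  | nil =>
    intro d cur F
    simp only [List.foldl_nil, rawSegs, consAttach, List.append_nil, finishSegs]
    by_cases h : PySem.Str.strip cur ≠ ""
    · rw [if_pos h, if_pos ((strip_ne_empty_iff cur).mp h), str_strip_eq]
    · rw [if_neg h, if_neg (fun hh => h ((strip_ne_empty_iff cur).mpr hh))]
      simp
  | cons ch t ih =>
    intro d cur F
    rw [List.foldl_cons]
    set d' := if ch = '{' then d + 1 else if ch = '}' then d - 1 else d with hd'
    by_cases hc : ch = ',' ∧ d' = 0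
    · have hstep : splitFieldsStep (F, d, cur) ch = (F ++ [PySem.Str.strip cur], d', "") := by
        unfold splitFieldsStep
        dsimp only
        rw [← hd', if_pos hc]
      rw [hstep, ih d' "" (F ++ [PySem.Str.strip cur])]
      have hraw : rawSegs (ch :: t) d = [] :: rawSegs t d' := by
        simp only [rawSegs, ← hd']
        rw [if_pos hc]
      rw [hraw]
      have h1 : consAttach cur.toList ([] :: rawSegs t d') = cur.toList :: rawSegs t d' := by
        simp [consAttach]
      rw [h1, finishSegs_cons _ _ (rawSegs_ne_nil t d')]
      have h2 : consAttach ("".toList) (rawSegs t d') = rawSegs t d' := by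
        cases hr : rawSegs t d' with
        | nil => exact absurd hr (rawSegs_ne_nil t d')
        | cons x r => simp [consAttach]
      rw [h2, str_strip_eq]
      simp
    · have hstep : splitFieldsStep (F, d, cur) ch = (F, d', cur.push ch) := by
        unfold splitFieldsStep
        dsimp only
        rw [← hd', if_neg hc]
      rw [hstep, ih d' (cur.push ch) F]
      have hpush : (cur.push ch).toList = cur.toList ++ [ch] := by simp
      rw [hpush]
      cases hr : rawSegs t d' with
      | nil => exact absurd hr (rawSegs_ne_nil t d')
      | cons x r =>
        have hraw : rawSegs (ch :: t) d = (ch :: x) :: r := by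
          simp only [rawSegs, ← hd', hr]
          rw [if_neg hc]
        rw [hraw]
        simp [consAttach]

-- findTopComma characterises rawSegs
theorem findTopComma_none (l : List Char) (d : Int) (h : findTopComma l d = none) :
    rawSegs l d = [l] := by
  induction l generalizing d with
  | nil => rfl
  | cons ch t ih =>
    simp only [findTopComma] at h
    split_ifs at h with h1 h2 h3
    · subst h1
      have hf : findTopComma t (d + 1) = none := by
        cases hx : findTopComma t (d + 1) with
        | none => rfl
        | some j => rw [hx] at h; simp at h
      simp [rawSegs, ih _ hf]
    · subst h2
      have hf : findTopComma t (d - 1) = none := by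
        cases hx : findTopComma t (d - 1) with
        | none => rfl
        | some j => rw [hx] at h; simp at h
      simp [rawSegs, ih _ hf]
    · have hf : findTopComma t d = none := by
        cases hx : findTopComma t d with
        | none => rfl
        | some j => rw [hx] at h; simp at h
      simp [rawSegs, h1, h2, h3, ih _ hf]

theorem findTopComma_some (l : List Char) (d : Int) (i : Nat) (h : findTopComma l d = some i) :
    rawSegs l d = l.take i :: rawSegs (l.drop (i + 1)) 0 := by
  induction l generalizing d i with
  | nil => simp [findTopComma] at h
  | cons ch t ih =>
    simp only [findTopComma] at h
    split_ifs at h with h1 h2 h3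
    · subst h1
      obtain ⟨j, hj, rfl⟩ := Option.map_eq_some_iff.mp h
      simp [rawSegs, ih _ _ hj]
    · subst h2
      obtain ⟨j, hj, rfl⟩ := Option.map_eq_some_iff.mp h
      simp [rawSegs, ih _ _ hj]
    · obtain ⟨hch, hd0⟩ := h3
      subst hch; subst hd0
      cases h
      simp [rawSegs]
    · obtain ⟨j, hj, rfl⟩ := Option.map_eq_some_iff.mp h
      simp [rawSegs, h1, h2, h3, ih _ _ hj]

theorem splitTop_eq_rawSegs (l : List Char) : splitTop l = rawSegs l 0 := by
  fun_induction splitTop l with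
  | case1 l h => exact (findTopComma_none l 0 h).symm
  | case2 l i h ih => rw [findTopComma_some l 0 i h, ih]

theorem getLast!_cons_cons (a b : String) (l : List String) :
    (a :: b :: l).getLast! = (b :: l).getLast! := by
  simp [List.getLast!]

theorem getLast!_singleton (a : String) : ([a] : List String).getLast! = a := by
  simp [List.getLast!]

theorem mk_nil_eq_empty : (String.ofList ([] : List Char)) = "" := by decide

theorem strip_of_mk_eq_empty {c : List Char} (h : String.ofList c = "") : c = [] := by
  have h2 := congrArg String.toList h
  simp only [String.toList_ofList] at h2
  exact h2

theorem mapStrip_dropLastIfEmpty : ∀ (segs : List (List Char)), segs ≠ [] →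
    (let fields := segs.map (fun p => String.ofList (PySem.Chars.strip p))
     if fields.getLast! = "" then fields.dropLast else fields) = finishSegs segs := by
  intro segs
  induction segs with
  | nil => intro h; exact absurd rfl h
  | cons c segs ih =>
    intro _
    cases segs with
    | nil =>
      dsimp only [List.map, finishSegs]
      rw [getLast!_singleton]
      by_cases hs : PySem.Chars.strip c = []
      · rw [hs, if_pos mk_nil_eq_empty, if_neg (by simp)]
        simp
      · rw [if_pos hs, if_neg (fun hmk => hs (strip_of_mk_eq_empty hmk))]
    | cons c' rest =>
      rw [finishSegs_cons _ _ (by simp)]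
      have ihh := ih (by simp)
      simp only [List.map_cons] at ihh ⊢
      rw [getLast!_cons_cons]
      by_cases hl : (String.ofList (PySem.Chars.strip c') :: rest.map (fun p => String.ofList (PySem.Chars.strip p))).getLast! = ""
      · rw [if_pos hl]
        rw [if_pos hl] at ihh
        rw [List.dropLast_cons_of_ne_nil (by simp), ihh]
      · rw [if_neg hl]
        rw [if_neg hl] at ihh
        rw [ihh]

theorem alt_eq_finish (s : String) : split_fields_py_alt s = finishSegs (rawSegs s.toList 0) := by
  unfold split_fields_py_alt
  rw [splitTop_eq_rawSegs]
  exact mapStrip_dropLastIfEmpty (rawSegs s.toList 0) (rawSegs_ne_nil _ _)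

-- ===== VERDICT (by name: the statement is the Claim_ definition above) =====
theorem split_fields_py_spec : Claim_equal_split_fields_py := by
  intro s _
  show split_fields_py s = split_fields_py_alt s
  unfold split_fields_py
  rw [loopA_invariant s.toList 0 "" []]
  rw [alt_eq_finish]
  have h2 : consAttach ("".toList) (rawSegs s.toList 0) = rawSegs s.toList 0 := by
    cases hr : rawSegs s.toList 0 with
    | nil => exact absurd hr (rawSegs_ne_nil _ _)
    | cons x r => simp [consAttach]
  rw [h2]
  simp
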